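-- pv_equiv track=rewrite | github.com/Rajavardhanreddy1/60-days-of-python | day41/gfg problem minmax candy.py | minMaxCandy
-- ===== SOURCE A (Python) =====
-- def minMaxCandy(a, b):
--     a.sort()
--     n = len(a)
--
--     x = 0
--     i, j = 0, n - 1
--     while i <= j:
--         x += a[i]
--         i += 1
--         j -= b
--
--     y = 0
--     i, j = 0, n - 1
--     while i <= j:
--         y += a[j]
--         j -= 1
--         i += b
--
--     return [x, y]
-- ===== SOURCE B (Python) =====
-- def minMaxCandy(a, b):
--     a.sort()
--     n = len(a)
--     if n == 0:
--         return [0, 0]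
--     m = -(-n // (b + 1))  # ceil(n / (b+1)): number of candies actually paid for
--     return [sum(a[:m]), sum(a[n - m:])]
-- ===== Notes on version B (the rewrite author's own statement) =====
-- stated objective: simpler
-- what changed: Replaces A's two index-stepping while loops by a closed-form purchase count m = ceil(n/(b+1)) and two slice sums over the sorted list.
import Mathlib
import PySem

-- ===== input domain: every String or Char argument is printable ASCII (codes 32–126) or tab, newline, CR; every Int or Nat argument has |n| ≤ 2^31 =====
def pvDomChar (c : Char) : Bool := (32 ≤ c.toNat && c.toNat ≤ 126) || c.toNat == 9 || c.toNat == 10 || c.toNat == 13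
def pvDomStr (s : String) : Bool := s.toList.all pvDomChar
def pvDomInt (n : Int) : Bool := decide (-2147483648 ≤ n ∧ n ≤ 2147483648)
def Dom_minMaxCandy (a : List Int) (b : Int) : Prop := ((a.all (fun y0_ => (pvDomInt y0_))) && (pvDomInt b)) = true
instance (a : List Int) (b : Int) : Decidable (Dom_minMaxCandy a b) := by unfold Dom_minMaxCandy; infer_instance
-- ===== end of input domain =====

-- B replaces A's two index-stepping while loops by a closed-form purchase count
-- m = ceil(n/(b+1)) and two slice sums (objective: simpler).  Both A and B sort the
-- list argument in place (same observable mutation); the equivalence is about the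
-- return value.

-- ===== PORT A =====
-- while i <= j: x += a[i]; i += 1; j -= b   (fuel = len(a) suffices: at most len(a) iterations when b >= 0)
def minMaxLoopX (s : List Int) (b : Int) : Nat → Int → Int → Int → Int
  | 0, x, _, _ => x
  | f + 1, x, i, j =>
    if i ≤ j then minMaxLoopX s b f (x + (PySem.List.pyGet? s i).getD 0) (i + 1) (j - b)
    else x

-- while i <= j: y += a[j]; j -= 1; i += b
def minMaxLoopY (s : List Int) (b : Int) : Nat → Int → Int → Int → Int
  | 0, y, _, _ => y
  | f + 1, y, i, j =>
    if i ≤ j then minMaxLoopY s b f (y + (PySem.List.pyGet? s j).getD 0) (i + b) (j - 1)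
    else y

def minMaxCandy (a : List Int) (b : Int) : List Int :=
  let s := PySem.List.sorted a (fun v => v) false
  let n : Int := s.length
  [minMaxLoopX s b s.length 0 0 (n - 1), minMaxLoopY s b s.length 0 0 (n - 1)]

-- ===== PORT B =====
def minMaxCandy_alt (a : List Int) (b : Int) : List Int :=
  let s := PySem.List.sorted a (fun v => v) false
  let n : Int := s.length
  if n = 0 then [0, 0]
  else
    let m := -(PySem.Int.floordiv (-n) (b + 1))   -- ceil(n / (b+1))
    [(PySem.List.slice s none (some m)).sum, (PySem.List.slice s (some (n - m)) none).sum]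

-- ===== PRECONDITION & SPEC =====
-- Pre_ excludes b < 0 with a nonempty list: there A's while loops never terminate
-- (j -= b never closes the gap), so A returns on no such input.
def Pre_minMaxCandy (a : List Int) (b : Int) : Prop := a = [] ∨ 0 ≤ b
instance (a : List Int) (b : Int) : Decidable (Pre_minMaxCandy a b) := by unfold Pre_minMaxCandy; infer_instance
def pvWitness_minMaxCandy : List Int × Int := ([3, 1, 2], 1)

def Spec_minMaxCandy (a : List Int) (b : Int) (out : List Int) : Prop := out = minMaxCandy_alt a b
instance (a : List Int) (b : Int) (out : List Int) : Decidable (Spec_minMaxCandy a b out) := by unfold Spec_minMaxCandy; infer_instance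

-- ===== CLAIM (what is proved, stated in full; the proofs are below) =====
def Claim_equal_minMaxCandy : Prop := ∀ (a : List Int) (b : Int), Dom_minMaxCandy a b → Pre_minMaxCandy a b → Spec_minMaxCandy a b (minMaxCandy a b)

-- ===== LEMMAS AND PROOFS =====

-- sum of the k elements of s starting at index a
def sumRange (s : List Int) (a k : Nat) : Int := ((s.drop a).take k).sum

lemma sumRange_zero (s : List Int) (a : Nat) : sumRange s a 0 = 0 := rfl

lemma sumRange_cons (s : List Int) (a k : Nat) (h : a < s.length) :
    sumRange s a (k + 1) = s.getD a 0 + sumRange s (a + 1) k := by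
  unfold sumRange
  rw [List.drop_eq_getElem_cons h, List.take_succ_cons, List.sum_cons]
  simp [List.getD, List.getElem?_eq_getElem h]

lemma sumRange_snoc (s : List Int) (a k : Nat) (h : a + k < s.length) :
    sumRange s a (k + 1) = sumRange s a k + s.getD (a + k) 0 := by
  induction k generalizing a with
  | zero =>
    rw [sumRange_cons s a 0 (by omega)]
    simp [sumRange_zero]
  | succ k ih =>
    rw [sumRange_cons s a (k + 1) (by omega), sumRange_cons s a k (by omega),
        ih (a + 1) (by omega)]
    have : a + 1 + k = a + (k + 1) := by omega
    rw [this]; ring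

lemma loopX_eq (s : List Int) (b : Int) (hb : 0 ≤ b) :
    ∀ (f k : Nat) (x i j : Int), 0 ≤ i →
      (k = 0 → j < i) →
      (k ≠ 0 → ((k : Int) - 1) * (b + 1) ≤ j - i ∧ j - i < (k : Int) * (b + 1)) →
      k ≤ f → i.toNat + k ≤ s.length → j < (s.length : Int) →
      minMaxLoopX s b f x i j = x + sumRange s i.toNat k := by
  intro f
  induction f with
  | zero =>
    intro k x i j _ hk0 _ hkf _ _
    have hk : k = 0 := by omega
    subst hk
    simp [minMaxLoopX, sumRange_zero]
  | succ f ih =>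
    intro k x i j hi hk0 hkb hkf hlen hj
    by_cases hij : i ≤ j
    · have hk : k ≠ 0 := by
        intro h; exact absurd hij (not_le.mpr (hk0 h))
      obtain ⟨k', rfl⟩ : ∃ k', k = k' + 1 := ⟨k - 1, by omega⟩
      obtain ⟨hlo, hhi⟩ := hkb hk
      have hcast : ((k' + 1 : Nat) : Int) = (k' : Int) + 1 := by push_cast; ring
      rw [hcast] at hlo hhi
      have hiN : i.toNat < s.length := by omega
      rw [minMaxLoopX, if_pos hij]
      rw [ih k' (x + (PySem.List.pyGet? s i).getD 0) (i + 1) (j - b)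
        (by omega)
        (by intro h0; subst h0; simp at hhi ⊢; omega)
        (by intro h0
            have hk'1 : (1 : Int) ≤ (k' : Int) := by
              have : k' ≠ 0 := h0
              omega
            constructor
            · nlinarith
            · nlinarith)
        (by omega) (by omega) (by omega)]
      have hget : (PySem.List.pyGet? s i).getD 0 = s.getD i.toNat 0 := by
        rw [PySem.List.pyGet?_of_nonneg s hi]
        simp [List.getD, List.getElem?_eq_getElem hiN]
      have hstep : (i + 1).toNat = i.toNat + 1 := by omega
      rw [hget, hstep, sumRange_cons s i.toNat k' hiN]
      ring
    · have hk : k = 0 := by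
        by_contra h
        obtain ⟨hlo, _⟩ := hkb h
        have h1 : (0 : Int) ≤ ((k : Int) - 1) * (b + 1) := by
          have : (1 : Int) ≤ (k : Int) := by omega
          nlinarith
        omega
      subst hk
      rw [minMaxLoopX, if_neg hij]
      simp [sumRange_zero]

lemma loopY_eq (s : List Int) (b : Int) (hb : 0 ≤ b) :
    ∀ (f k : Nat) (y i j : Int), 0 ≤ i →
      (k = 0 → j < i) →
      (k ≠ 0 → ((k : Int) - 1) * (b + 1) ≤ j - i ∧ j - i < (k : Int) * (b + 1)) →
      k ≤ f → (k : Int) ≤ j + 1 → j < (s.length : Int) →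
      minMaxLoopY s b f y i j = y + sumRange s (j.toNat + 1 - k) k := by
  intro f
  induction f with
  | zero =>
    intro k y i j _ hk0 _ hkf _ _
    have hk : k = 0 := by omega
    subst hk
    simp [minMaxLoopY, sumRange_zero]
  | succ f ih =>
    intro k y i j hi hk0 hkb hkf hkj hj
    by_cases hij : i ≤ j
    · have hk : k ≠ 0 := by
        intro h; exact absurd hij (not_le.mpr (hk0 h))
      obtain ⟨k', rfl⟩ : ∃ k', k = k' + 1 := ⟨k - 1, by omega⟩
      obtain ⟨hlo, hhi⟩ := hkb hk
      have hcast : ((k' + 1 : Nat) : Int) = (k' : Int) + 1 := by push_cast; ring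
      rw [hcast] at hlo hhi
      have hj0 : 0 ≤ j := le_trans hi hij
      have hjN : j.toNat < s.length := by omega
      have hk'j : (k' : Int) ≤ j := by
        by_cases h0 : k' = 0
        · subst h0; simpa using hj0
        · have hk'1 : (1 : Int) ≤ (k' : Int) := by
            have : k' ≠ 0 := h0; omega
          nlinarith
      rw [minMaxLoopY, if_pos hij]
      rw [ih k' (y + (PySem.List.pyGet? s j).getD 0) (i + b) (j - 1)
        (by omega)
        (by intro h0; subst h0; simp at hhi ⊢; omega)
        (by intro h0
            have hk'1 : (1 : Int) ≤ (k' : Int) := by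
              have : k' ≠ 0 := h0; omega
            constructor
            · nlinarith
            · nlinarith)
        (by omega) (by omega) (by omega)]
      have hget : (PySem.List.pyGet? s j).getD 0 = s.getD j.toNat 0 := by
        rw [PySem.List.pyGet?_of_nonneg s hj0]
        simp [List.getD, List.getElem?_eq_getElem hjN]
      by_cases h0 : k' = 0
      · subst h0
        rw [hget, sumRange_zero]
        have hidx : j.toNat + 1 - (0 + 1) = j.toNat := by omega
        rw [hidx, sumRange_cons s j.toNat 0 hjN, sumRange_zero]
        ring
      · have hj1 : 1 ≤ j := by
          have : (1 : Int) ≤ (k' : Int) := by omega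
          omega
        have hstart : (j - 1).toNat + 1 - k' = j.toNat - k' := by omega
        rw [hget, hstart]
        have hidx : j.toNat + 1 - (k' + 1) = j.toNat - k' := by omega
        rw [hidx]
        have hsnoc := sumRange_snoc s (j.toNat - k') k' (by omega)
        have hix : j.toNat - k' + k' = j.toNat := by omega
        rw [hix] at hsnoc
        rw [hsnoc]
        ring
    · have hk : k = 0 := by
        by_contra h
        obtain ⟨hlo, _⟩ := hkb h
        have h1 : (0 : Int) ≤ ((k : Int) - 1) * (b + 1) := by
          have : (1 : Int) ≤ (k : Int) := by omega
          nlinarith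
        omega
      subst hk
      rw [minMaxLoopY, if_neg hij]
      simp [sumRange_zero]

lemma minMaxCandy_main (s : List Int) (b : Int) (hb : 0 ≤ b) (hnil : s ≠ []) :
    [minMaxLoopX s b s.length 0 0 ((s.length : Int) - 1),
     minMaxLoopY s b s.length 0 0 ((s.length : Int) - 1)] =
    (if (s.length : Int) = 0 then [0, 0]
     else
       [(PySem.List.slice s none (some (-(PySem.Int.floordiv (-(s.length : Int)) (b + 1))))).sum,
        (PySem.List.slice s (some ((s.length : Int) - -(PySem.Int.floordiv (-(s.length : Int)) (b + 1)))) none).sum]) := by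
  have hn1 : 1 ≤ s.length := by
    have := List.length_pos_of_ne_nil hnil; omega
  set n : Int := (s.length : Int) with hn
  set m : Int := -(PySem.Int.floordiv (-n) (b + 1)) with hmdef
  obtain ⟨hm1, hm2⟩ : (m - 1) * (b + 1) < n ∧ n ≤ m * (b + 1) :=
    (PySem.Int.neg_floordiv_neg_eq_iff_of_pos (by omega)).mp rfl
  have hmpos : 1 ≤ m := by
    by_contra h
    have hm0 : m ≤ 0 := by omega
    have : m * (b + 1) ≤ 0 := mul_nonpos_of_nonpos_of_nonneg hm0 (by omega)
    omega
  have hmn : m ≤ n := by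
    have : m - 1 ≤ (m - 1) * (b + 1) := by nlinarith
    omega
  have hkc : ((m.toNat : Int)) = m := by omega
  have hX := loopX_eq s b hb s.length m.toNat 0 0 (n - 1)
    le_rfl
    (by intro h; omega)
    (by intro _; rw [hkc]; omega)
    (by omega) (by omega) (by omega)
  have hY := loopY_eq s b hb s.length m.toNat 0 0 (n - 1)
    le_rfl
    (by intro h; omega)
    (by intro _; rw [hkc]; omega)
    (by omega) (by rw [hkc]; omega) (by omega)
  rw [if_neg (by omega), hX, hY]
  congr 1
  · -- x component
    rw [PySem.List.slice_to s (by omega : (0:Int) ≤ m)]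
    simp [sumRange]
  · -- y component
    congr 1
    rw [PySem.List.slice_from s (by omega : (0:Int) ≤ n - m)]
    have hp : (n - m).toNat = s.length - m.toNat := by omega
    have hstart : (n - 1).toNat + 1 - m.toNat = s.length - m.toNat := by omega
    rw [hp, hstart]
    unfold sumRange
    rw [List.take_of_length_le (by simp; omega)]
    ring

-- ===== VERDICT (by name: the statement is the Claim_ definition above) =====
theorem minMaxCandy_spec : Claim_equal_minMaxCandy := by
  intro a b _ hpre
  unfold Spec_minMaxCandy
  rcases hpre with h | hb
  · subst h; rfl
  · unfold minMaxCandy minMaxCandy_alt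
    dsimp only
    generalize PySem.List.sorted a (fun v => v) false = s
    by_cases hnil : s = []
    · subst hnil; rfl
    · exact minMaxCandy_main s b hb hnil
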